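-- pv_equiv track=rewrite | github.com/mrtnnvk/lokito | pipeline/parse_decree_docx.py | _preprocess_lines
-- ===== SOURCE A (Python) =====
-- def _preprocess_lines(lines: list[str]) -> list[str]:
--     """
--     Join multi-line markdown elements:
--       - School headers: **[Name part1\npart2]{.underline}**
--       - Any line ending with '**[' continuation not closed on same line
--     Also joins trailing street-spec continuations (handled later per-entry).
--     """
--     result = []
--     i = 0
--     while i < len(lines):
--         line = lines[i].rstrip('\n')
--         stripped = line.strip()
--
--         # Multi-line school header: starts with **[ but doesn't close on same line
--         if stripped.startswith('**[') and ']{.underline}**' not in stripped: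
--             # Join with following lines until we find the closing
--             combined = stripped
--             i += 1
--             while i < len(lines):
--                 next_stripped = lines[i].rstrip('\n').strip()
--                 combined = combined + ' ' + next_stripped
--                 i += 1
--                 if ']{.underline}**' in next_stripped:
--                     break
--             result.append(combined)
--             continue
--
--         result.append(stripped)
--         i += 1
--     return result
-- ===== SOURCE B (Python) =====
-- def _preprocess_lines(lines: list[str]) -> list[str]:
--     """Flat single loop with an optional accumulator instead of the nested while."""
--     result = []
--     combined = None
--     for line in lines:
--         s = line.rstrip('\n').strip()
--         if combined is not None:
--             combined = combined + ' ' + s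
--             if ']{.underline}**' in s:
--                 result.append(combined)
--                 combined = None
--         elif s.startswith('**[') and ']{.underline}**' not in s:
--             combined = s
--         else:
--             result.append(s)
--     if combined is not None:
--         result.append(combined)
--     return result
-- ===== Notes on version B (the rewrite author's own statement) =====
-- stated objective: simpler
-- what changed: Replaced the nested while loops with index arithmetic by a single flat for-loop over the lines carrying an optional accumulator for an open multi-line header, flushed once at end of input.
import Mathlib
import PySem

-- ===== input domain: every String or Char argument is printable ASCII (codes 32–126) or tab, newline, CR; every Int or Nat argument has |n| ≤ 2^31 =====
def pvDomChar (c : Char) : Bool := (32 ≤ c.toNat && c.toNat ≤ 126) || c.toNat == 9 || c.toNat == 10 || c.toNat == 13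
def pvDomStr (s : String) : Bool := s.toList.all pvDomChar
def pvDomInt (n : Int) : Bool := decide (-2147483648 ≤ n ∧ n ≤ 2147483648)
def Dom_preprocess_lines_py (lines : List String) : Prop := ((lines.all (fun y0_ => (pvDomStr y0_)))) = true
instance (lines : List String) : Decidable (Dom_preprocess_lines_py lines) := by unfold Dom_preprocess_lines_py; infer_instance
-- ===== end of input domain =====

-- B replaces A's nested while loops by one flat loop with an optional accumulator (objective: simpler).

-- ===== PORT A =====
-- line.rstrip('\n') — ported by hand (PySem has no rstrip-with-chars): drop trailing '\n' chars; exact for this single-char strip set.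
def plRstripNL (s : String) : String := String.ofList ((s.toList.reverse.dropWhile (fun c => c == '\n')).reverse)

-- lines[i].rstrip('\n').strip() — shared by both ports, as by both Pythons
def plStripLine (s : String) : String := PySem.Str.strip (plRstripNL s)

-- A's inner while: join following lines into `combined` until one contains the closing marker;
-- returns the combined header and the remaining (unconsumed) lines.
def plInner (combined : String) (rest : List String) : String × List String :=
  match rest with
  | [] => (combined, [])
  | l :: rest' =>
    let next_stripped := plStripLine l
    let c := combined ++ " " ++ next_stripped
    if PySem.Str.isIn "]{.underline}**" next_stripped then (c, rest') else plInner c rest'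

-- termination helper for plGo: the inner while only consumes lines
theorem plInner_length_le (combined : String) (rest : List String) :
    (plInner combined rest).2.length ≤ rest.length := by
  induction rest generalizing combined with
  | nil => simp [plInner]
  | cons l rest' ih =>
    simp only [plInner]
    split
    · simp
    · exact le_trans (ih _) (by simp)

-- A's outer while over the remaining lines, with A's `result` accumulator
def plGo (rest : List String) (result : List String) : List String :=
  match rest with
  | [] => result
  | l :: rest' =>
    let stripped := plStripLine l
    if PySem.Str.startswith stripped "**[" && !PySem.Str.isIn "]{.underline}**" stripped then
      plGo (plInner stripped rest').2 (result ++ [(plInner stripped rest').1])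
    else
      plGo rest' (result ++ [stripped])
termination_by rest.length
decreasing_by
  · have := plInner_length_le stripped rest'; simp; omega
  · simp

def preprocess_lines_py (lines : List String) : List String := plGo lines []

-- ===== PORT B =====
-- one step of B's flat loop: state = (result so far, optionally open combined header)
def plStep (acc : List String × Option String) (line : String) : List String × Option String :=
  let s := plStripLine line
  match acc.2 with
  | some c =>
    let c' := c ++ " " ++ s
    if PySem.Str.isIn "]{.underline}**" s then (acc.1 ++ [c'], none) else (acc.1, some c')
  | none =>
    if PySem.Str.startswith s "**[" && !PySem.Str.isIn "]{.underline}**" s then (acc.1, some s)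
    else (acc.1 ++ [s], none)

-- the final `if combined is not None: result.append(combined)`
def plFlush (acc : List String × Option String) : List String :=
  match acc.2 with
  | some c => acc.1 ++ [c]
  | none => acc.1

def preprocess_lines_py_alt (lines : List String) : List String :=
  plFlush (lines.foldl plStep ([], none))

-- ===== PRECONDITION & SPEC =====
def Spec_preprocess_lines_py (lines : List String) (out : List String) : Prop := out = preprocess_lines_py_alt lines
instance (lines : List String) (out : List String) : Decidable (Spec_preprocess_lines_py lines out) := by unfold Spec_preprocess_lines_py; infer_instance

-- ===== CLAIM (what is proved, stated in full; the proofs are below) =====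
def Claim_equal_preprocess_lines_py : Prop := ∀ (lines : List String), Dom_preprocess_lines_py lines → Spec_preprocess_lines_py lines (preprocess_lines_py lines)

-- ===== LEMMAS AND PROOFS =====

-- one step of B's fold, written out for each state (definitional)
theorem plStep_none (res : List String) (line : String) :
    plStep (res, none) line =
      if PySem.Str.startswith (plStripLine line) "**[" &&
          !PySem.Str.isIn "]{.underline}**" (plStripLine line) then (res, some (plStripLine line))
      else (res ++ [plStripLine line], none) := rfl

theorem plStep_some (res : List String) (c : String) (line : String) :
    plStep (res, some c) line =
      if PySem.Str.isIn "]{.underline}**" (plStripLine line) then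
        (res ++ [c ++ " " ++ plStripLine line], none)
      else (res, some (c ++ " " ++ plStripLine line)) := rfl

-- Both modes of the correspondence at once, by strong induction on the number of remaining lines:
-- closed mode: A's outer loop = B's fold in state (result, none);
-- open mode:  A's inner join followed by the outer loop = B's fold in state (result, some c).
theorem plGo_eq_fold (n : Nat) :
    ∀ rest : List String, rest.length ≤ n →
      (∀ result, plGo rest result = plFlush (rest.foldl plStep (result, none))) ∧
      (∀ c result,
        plGo (plInner c rest).2 (result ++ [(plInner c rest).1]) =
          plFlush (rest.foldl plStep (result, some c))) := by
  induction n with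
  | zero =>
    intro rest hlen
    have : rest = [] := List.eq_nil_of_length_eq_zero (Nat.le_zero.mp hlen)
    subst this
    constructor
    · intro result; simp [plGo, plFlush]
    · intro c result; simp [plInner, plGo, plFlush]
  | succ n ih =>
    intro rest hlen
    match rest with
    | [] =>
      constructor
      · intro result; simp [plGo, plFlush]
      · intro c result; simp [plInner, plGo, plFlush]
    | l :: rest' =>
      have hlen' : rest'.length ≤ n := by simpa using Nat.lt_succ_iff.mp (by simpa using hlen)
      constructor
      · intro result
        rw [plGo]
        by_cases hcond : (PySem.Str.startswith (plStripLine l) "**[" &&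
            !PySem.Str.isIn "]{.underline}**" (plStripLine l)) = true
        · rw [if_pos hcond, (ih rest' hlen').2 (plStripLine l) result,
            List.foldl_cons, plStep_none, if_pos hcond]
        · rw [if_neg hcond, (ih rest' hlen').1 (result ++ [plStripLine l]),
            List.foldl_cons, plStep_none, if_neg hcond]
      · intro c result
        rw [plInner]
        by_cases hclose : PySem.Str.isIn "]{.underline}**" (plStripLine l) = true
        · rw [if_pos hclose, (ih rest' hlen').1 (result ++ [c ++ " " ++ plStripLine l]),
            List.foldl_cons, plStep_some, if_pos hclose]
        · rw [if_neg hclose, (ih rest' hlen').2 (c ++ " " ++ plStripLine l) result,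
            List.foldl_cons, plStep_some, if_neg hclose]

-- ===== VERDICT (by name: the statement is the Claim_ definition above) =====
theorem preprocess_lines_py_spec : Claim_equal_preprocess_lines_py := by
  intro lines _
  unfold Spec_preprocess_lines_py preprocess_lines_py preprocess_lines_py_alt
  exact (plGo_eq_fold lines.length lines le_rfl).1 []
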